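-- pv_equiv track=rewrite | github.com/alist2000/UI_Wood | stableVersion5/Sync/shearWallSync.py | NoShearWallLines
-- ===== SOURCE A (Python) =====
-- def NoShearWallLines(shearWallLines, names_set):
--     noShearWalls = {}
--     for story, lines in shearWallLines.items():
--         noShearWalls[story] = set()
--         noShearWalls[story] = names_set - lines
--         noShearWalls[story] = list(noShearWalls[story])
--         noShearWalls[story].sort()
--     return noShearWalls
-- ===== SOURCE B (Python) =====
-- def NoShearWallLines(shearWallLines, names_set):
--     def diff(xs, ys):
--         # merge scan of two strictly ascending lists: keep the xs entries absent from ys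
--         out = []
--         i = j = 0
--         while i < len(xs):
--             if j < len(ys) and ys[j] < xs[i]:
--                 j += 1
--             elif j < len(ys) and ys[j] == xs[i]:
--                 i += 1
--                 j += 1
--             else:
--                 out.append(xs[i])
--                 i += 1
--         return out
--     ordered = sorted(set(names_set))
--     return {story: diff(ordered, sorted(set(lines)))
--             for story, lines in shearWallLines.items()}
-- ===== Notes on version B (the rewrite author's own statement) =====
-- stated objective: alternative
-- what changed: B sorts the names once and each story's lines once, then computes each story's complement with an index-pointer merge scan over the two sorted lists, instead of A's per-story set subtraction followed by a per-story sort.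
import Mathlib
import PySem

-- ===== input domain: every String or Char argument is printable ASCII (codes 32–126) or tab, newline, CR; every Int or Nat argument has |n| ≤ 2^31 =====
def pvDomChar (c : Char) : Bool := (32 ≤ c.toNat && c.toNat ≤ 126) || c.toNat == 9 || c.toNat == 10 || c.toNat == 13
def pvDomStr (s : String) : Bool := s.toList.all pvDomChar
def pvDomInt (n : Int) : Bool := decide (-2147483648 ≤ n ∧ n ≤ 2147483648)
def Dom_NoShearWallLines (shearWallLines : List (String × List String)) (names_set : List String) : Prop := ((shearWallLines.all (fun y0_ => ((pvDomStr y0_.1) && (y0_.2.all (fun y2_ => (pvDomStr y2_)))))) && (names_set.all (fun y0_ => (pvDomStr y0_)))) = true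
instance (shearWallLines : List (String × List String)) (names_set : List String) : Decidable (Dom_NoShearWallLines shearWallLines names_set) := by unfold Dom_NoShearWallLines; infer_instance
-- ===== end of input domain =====

-- B sorts the names once and each story's lines once, then computes each complement by a
-- recursive two-list merge of the sorted sequences — no set subtraction, no membership test,
-- no per-story sort of the result (objective: alternative).

-- ===== PORT A =====
-- A: for each story, noShearWalls[story] = set(); then = names_set - lines; then = list(...); then .sort().
-- list(·) of a PySem.Set is the Set's element list itself; the in-place .sort() is the final overwrite.
def NoShearWallLines (shearWallLines : List (String × List String)) (names_set : List String) : List (String × List String) :=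
  (shearWallLines.foldl
    (fun (noShearWalls : PySem.Dict String (List String)) p =>
      let d0 := noShearWalls.insert p.1 ([] : List String)            -- noShearWalls[story] = set()
      let d1 := d0.insert p.1 (PySem.Set.diff (PySem.Set.ofList names_set) p.2)  -- = names_set - lines
      d1.insert p.1 (PySem.List.sorted (PySem.Set.diff (PySem.Set.ofList names_set) p.2) (fun x => x) false))
                                                                      -- = list(...); .sort()
    PySem.Dict.empty).items

-- ===== PORT B =====
-- diff(xs, ys): Source B's index-pointer merge scan over the two strictly ascending lists;
-- fuel bounds the loop's step count (totality guard only); out is the accumulator list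
def pvDiffGo (xs ys : List String) : Nat → Nat → Nat → List String → List String
  | 0, _, _, out => out
  | fuel + 1, i, j, out =>
    if i < xs.length then
      if j < ys.length ∧ ys.getD j "" < xs.getD i "" then
        pvDiffGo xs ys fuel i (j + 1) out
      else if j < ys.length ∧ ys.getD j "" == xs.getD i "" then
        pvDiffGo xs ys fuel (i + 1) (j + 1) out
      else
        pvDiffGo xs ys fuel (i + 1) j (out ++ [xs.getD i ""])
    else out

def pvDiff (xs ys : List String) : List String :=
  pvDiffGo xs ys (xs.length + ys.length) 0 0 []

def NoShearWallLines_alt (shearWallLines : List (String × List String)) (names_set : List String) : List (String × List String) :=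
  let ordered := PySem.List.sorted (PySem.Set.ofList names_set) (fun x => x) false   -- sorted(set(names_set))
  (shearWallLines.foldl
    (fun (result : PySem.Dict String (List String)) p =>
      result.insert p.1 (pvDiff ordered (PySem.List.sorted (PySem.Set.ofList p.2) (fun x => x) false)))
    PySem.Dict.empty).items

-- ===== PRECONDITION & SPEC =====
def Spec_NoShearWallLines (shearWallLines : List (String × List String)) (names_set : List String) (out : List (String × List String)) : Prop := out = NoShearWallLines_alt shearWallLines names_set
instance (shearWallLines : List (String × List String)) (names_set : List String) (out : List (String × List String)) : Decidable (Spec_NoShearWallLines shearWallLines names_set out) := by unfold Spec_NoShearWallLines; infer_instance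

-- ===== CLAIM (what is proved, stated in full; the proofs are below) =====
def Claim_equal_NoShearWallLines : Prop := ∀ (shearWallLines : List (String × List String)) (names_set : List String), Dom_NoShearWallLines shearWallLines names_set → Spec_NoShearWallLines shearWallLines names_set (NoShearWallLines shearWallLines names_set)

-- ===== LEMMAS AND PROOFS =====

-- Overwriting the same key twice is one overwrite.
theorem pv_insert_insert_self {κ ν : Type} [BEq κ] [LawfulBEq κ]
    (d : PySem.Dict κ ν) (k : κ) (v1 v2 : ν) :
    (d.insert k v1).insert k v2 = d.insert k v2 := by
  simp only [PySem.Dict.insert, PySem.Dict.contains]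
  by_cases h : (d.items.any fun p => p.1 == k) = true
  · rw [if_pos h]
    have hany : (((d.items.map fun p => if (p.1 == k) = true then (k, v1) else p)).any
        fun p => p.1 == k) = true := by
      rcases List.any_eq_true.mp h with ⟨p, hp, hk⟩
      exact List.any_eq_true.mpr ⟨(k, v1), List.mem_map.mpr ⟨p, hp, by simp [hk]⟩, by simp⟩
    simp only [hany, if_pos h, if_true, List.map_map]
    congr 1
    apply List.map_congr_left; intro p _
    by_cases hk : (p.1 == k) = true <;> simp [Function.comp, hk]
  · rw [if_neg h]
    have hany : ((d.items ++ [(k, v1)]).any fun p => p.1 == k) = true := by simp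
    have h' : ∀ p ∈ d.items, (p.1 == k) = false := by
      intro p hp
      by_contra hc
      have hk : (p.1 == k) = true := by simpa using hc
      exact h (List.any_eq_true.mpr ⟨p, hp, hk⟩)
    have hmap : (d.items.map fun p => if (p.1 == k) = true then (k, v2) else p) = d.items := by
      rw [List.map_congr_left (g := id) (fun p hp => by simp [h' p hp])]; simp
    simp [hany, if_neg h, hmap]

-- Taking the set difference and then sorting = sorting the set once and then filtering it.
theorem pv_sorted_diff_eq_filter_sorted (ns lines : List String) :
    PySem.List.sorted (PySem.Set.diff (PySem.Set.ofList ns) lines) (fun x => x) false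
      = (PySem.List.sorted (PySem.Set.ofList ns) (fun x => x) false).filter
          (fun n => !lines.contains n) := by
  apply PySem.List.sorted_eq_of_perm_of_pairwise_lt
  · have h := (PySem.List.sorted_perm (PySem.Set.ofList ns) (fun x => x) false).filter
      (fun n => !lines.contains n)
    simpa [PySem.Set.diff, PySem.Set.contains] using h
  · exact (PySem.List.sorted_ofList_pairwise_lt ns).sublist List.filter_sublist

-- On strictly ascending lists, the merge scan computes the membership filter.
theorem pvDiffGo_eq (xs ys : List String) (fuel i j : Nat) (out : List String)
    (hf : (xs.length - i) + (ys.length - j) ≤ fuel)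
    (hx : (xs.drop i).Pairwise (· < ·)) (hy : (ys.drop j).Pairwise (· < ·)) :
    pvDiffGo xs ys fuel i j out
      = out ++ (xs.drop i).filter (fun n => !(ys.drop j).contains n) := by
  induction fuel generalizing i j out with
  | zero =>
    have hi : xs.length ≤ i := by omega
    simp [pvDiffGo, List.drop_eq_nil_of_le hi]
  | succ f ih =>
    by_cases hi : i < xs.length
    · have hdx : xs.drop i = xs[i] :: xs.drop (i + 1) := List.drop_eq_getElem_cons hi
      have hgx : xs.getD i "" = xs[i] := List.getD_eq_getElem xs "" hi
      by_cases hj : j < ys.length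
      · have hdy : ys.drop j = ys[j] :: ys.drop (j + 1) := List.drop_eq_getElem_cons hj
        have hgy : ys.getD j "" = ys[j] := List.getD_eq_getElem ys "" hj
        have hx' : (xs.drop (i+1)).Pairwise (· < ·) := by rw [hdx] at hx; exact hx.tail
        have hy' : (ys.drop (j+1)).Pairwise (· < ·) := by rw [hdy] at hy; exact hy.tail
        have hxall : ∀ e ∈ xs.drop (i+1), xs[i] < e := by
          rw [hdx] at hx; exact (List.pairwise_cons.mp hx).1
        by_cases hlt : ys[j] < xs[i]
        · -- skip ys[j]
          rw [pvDiffGo, if_pos hi, if_pos ⟨hj, by rw [hgx, hgy]; exact hlt⟩,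
              ih i (j+1) out (by omega) hx hy']
          congr 1
          apply List.filter_congr; intro a ha
          have hya : ys[j] < a := by
            rw [hdx] at ha
            rcases List.mem_cons.mp ha with rfl | ha'
            · exact hlt
            · exact lt_trans hlt (hxall a ha')
          have hne : a ≠ ys[j] := (ne_of_lt hya).symm
          rw [hdy]
          simp
          constructor
          · intro h; rw [hdy]; exact List.mem_cons_of_mem _ h
          · intro h; rw [hdy] at h
            rcases List.mem_cons.mp h with h' | h'
            · exact absurd h' hne
            · exact h'
        · by_cases heq : ys[j] = xs[i]
          · -- drop both
            rw [pvDiffGo, if_pos hi,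
                if_neg (by rw [hgx, hgy]; exact fun h => hlt h.2),
                if_pos ⟨hj, by rw [hgx, hgy]; exact beq_iff_eq.mpr heq⟩,
                ih (i+1) (j+1) out (by omega) hx' hy']
            congr 1
            rw [hdx, hdy, List.filter_cons]
            have hcont : ((ys[j] :: ys.drop (j+1)).contains xs[i]) = true := by
              rw [heq]; simp
            rw [hcont]
            rw [if_neg (by simp)]
            apply List.filter_congr; intro a ha
            have hne : a ≠ ys[j] := by
              rw [heq]; exact (ne_of_lt (hxall a ha)).symm
            simp
            constructor
            · intro h; rw [hdy]; exact List.mem_cons_of_mem _ h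
            · intro h; rw [hdy] at h
              rcases List.mem_cons.mp h with h' | h'
              · exact absurd h' hne
              · exact h'
          · -- keep xs[i]
            have hxy : xs[i] < ys[j] :=
              lt_of_le_of_ne (le_of_not_gt hlt) (fun h => heq h.symm)
            rw [pvDiffGo, if_pos hi,
                if_neg (by rw [hgx, hgy]; exact fun h => hlt h.2),
                if_neg (by rw [hgx, hgy]; exact fun h => heq (beq_iff_eq.mp h.2)),
                ih (i+1) j (out ++ [xs.getD i ""]) (by omega) hx' hy]
            have hnotin : xs[i] ∉ ys.drop j := by
              rw [hdy]; intro hm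
              rcases List.mem_cons.mp hm with h | hm'
              · exact absurd (h ▸ hxy) (lt_irrefl _)
              · rw [hdy] at hy
                exact absurd (lt_trans hxy ((List.pairwise_cons.mp hy).1 _ hm'))
                  (lt_irrefl _)
            rw [hdx, List.filter_cons]
            simp [List.getElem?_eq_getElem hi, hnotin]
      · -- ys exhausted: keep xs[i]
        have hdy : ys.drop j = [] := List.drop_eq_nil_of_le (by omega)
        rw [pvDiffGo, if_pos hi, if_neg (fun h => hj h.1), if_neg (fun h => hj h.1),
            ih (i+1) j (out ++ [xs.getD i ""]) (by omega)
              (by rw [hdx] at hx; exact hx.tail) hy]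
        rw [hdx, List.filter_cons]
        simp [List.getElem?_eq_getElem hi, hdy]
    · have hdx : xs.drop i = [] := List.drop_eq_nil_of_le (by omega)
      rw [pvDiffGo, if_neg hi]
      simp [hdx]

theorem pvDiff_eq_filter (xs ys : List String)
    (hx : xs.Pairwise (· < ·)) (hy : ys.Pairwise (· < ·)) :
    pvDiff xs ys = xs.filter (fun n => !ys.contains n) := by
  have := pvDiffGo_eq xs ys (xs.length + ys.length) 0 0 [] (by omega)
    (by simpa using hx) (by simpa using hy)
  simpa [pvDiff] using this

-- Per-story value of A equals per-story value of B.
theorem pv_story_eq (ns lines : List String) :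
    PySem.List.sorted (PySem.Set.diff (PySem.Set.ofList ns) lines) (fun x => x) false
      = pvDiff (PySem.List.sorted (PySem.Set.ofList ns) (fun x => x) false)
               (PySem.List.sorted (PySem.Set.ofList lines) (fun x => x) false) := by
  rw [pv_sorted_diff_eq_filter_sorted,
      pvDiff_eq_filter _ _ (PySem.List.sorted_ofList_pairwise_lt ns)
        (PySem.List.sorted_ofList_pairwise_lt lines)]
  apply List.filter_congr; intro a _
  have : (PySem.List.sorted (PySem.Set.ofList lines) (fun x => x) false).contains a
      = lines.contains a := by
    simp [PySem.List.mem_sorted, PySem.Set.mem_ofList]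
  rw [this]

-- ===== VERDICT (by name: the statement is the Claim_ definition above) =====
theorem NoShearWallLines_spec : Claim_equal_NoShearWallLines := by
  intro sw ns _
  unfold Spec_NoShearWallLines NoShearWallLines NoShearWallLines_alt
  congr 1
  apply List.foldl_ext
  intro d p _
  simp only [pv_insert_insert_self, pv_story_eq]
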